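-- pv_equiv track=rewrite | github.com/shininglegend/glossias | scripts/generate_heatmap.py | build_heatmap_data
-- ===== SOURCE A (Python) =====
-- def build_heatmap_data(lines, grammar_items, correct_data, incorrect_position_data, grammar_point_id):
--     """Build character-level heatmap for a specific grammar point."""
--     # Initialize heatmap structure: {line_num: {char_pos: {'correct': count, 'incorrect': count}}}
--     heatmap = {}
--
--     for line_num, text in lines:
--         heatmap[line_num] = {i: {'correct': 0, 'incorrect': 0} for i in range(len(text))}
--
--     # Add correct clicks (spread across grammar item span)
--     for item_line_num, gp_id, item_text, pos_start, pos_end, gp_name in grammar_items: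
--         if gp_id != grammar_point_id:
--             continue
--
--         correct_count = correct_data.get((item_line_num, gp_id), 0)
--
--         if correct_count > 0 and item_line_num in heatmap:
--             for pos in range(pos_start, min(pos_end, len(heatmap[item_line_num]))):
--                 heatmap[item_line_num][pos]['correct'] += correct_count
--
--     # Add incorrect clicks (precise positions)
--     for inc_line_num, inc_gp_id, selected_positions in incorrect_position_data:
--         if inc_gp_id != grammar_point_id:
--             continue
--
--         if selected_positions and inc_line_num in heatmap:
--             for pos in selected_positions:
--                 if 0 <= pos < len(heatmap[inc_line_num]):
--                     heatmap[inc_line_num][pos]['incorrect'] += 1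
--
--     return heatmap
-- ===== SOURCE B (Python) =====
-- def build_heatmap_data(lines, grammar_items, correct_data, incorrect_position_data, grammar_point_id):
--     """Build character-level heatmap for a specific grammar point.
--
--     Per line: a difference table + one prefix-sum sweep for correct clicks,
--     a counting pass for incorrect clicks, then one pass emits the row."""
--     texts = dict(lines)
--     result = {}
--     for line_num, text in texts.items():
--         n = len(text)
--         diff = [0] * (n + 1)
--         for item_line_num, gp_id, _item_text, pos_start, pos_end, _gp_name in grammar_items:
--             if gp_id == grammar_point_id and item_line_num == line_num:
--                 c = correct_data.get((item_line_num, gp_id), 0)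
--                 if c > 0:
--                     hi = min(pos_end, n)
--                     if pos_start < hi:
--                         diff[pos_start] += c
--                         diff[hi] -= c
--         inc = [0] * n
--         for inc_line_num, inc_gp_id, selected_positions in incorrect_position_data:
--             if inc_gp_id == grammar_point_id and inc_line_num == line_num:
--                 for p in selected_positions:
--                     if 0 <= p < n:
--                         inc[p] += 1
--         run = 0
--         row = {}
--         for i in range(n):
--             run += diff[i]
--             row[i] = {'correct': run, 'incorrect': inc[i]}
--         result[line_num] = row
--     return result
-- ===== Notes on version B (the rewrite author's own statement) =====
-- stated objective: alternative
-- what changed: B traverses line-major and replaces A's per-grammar-item inner loop over each span (mutating nested dicts) by a per-line difference table plus a single prefix-sum sweep, with incorrect clicks counted into a flat array and each row emitted functionally in one pass.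
import Mathlib
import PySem

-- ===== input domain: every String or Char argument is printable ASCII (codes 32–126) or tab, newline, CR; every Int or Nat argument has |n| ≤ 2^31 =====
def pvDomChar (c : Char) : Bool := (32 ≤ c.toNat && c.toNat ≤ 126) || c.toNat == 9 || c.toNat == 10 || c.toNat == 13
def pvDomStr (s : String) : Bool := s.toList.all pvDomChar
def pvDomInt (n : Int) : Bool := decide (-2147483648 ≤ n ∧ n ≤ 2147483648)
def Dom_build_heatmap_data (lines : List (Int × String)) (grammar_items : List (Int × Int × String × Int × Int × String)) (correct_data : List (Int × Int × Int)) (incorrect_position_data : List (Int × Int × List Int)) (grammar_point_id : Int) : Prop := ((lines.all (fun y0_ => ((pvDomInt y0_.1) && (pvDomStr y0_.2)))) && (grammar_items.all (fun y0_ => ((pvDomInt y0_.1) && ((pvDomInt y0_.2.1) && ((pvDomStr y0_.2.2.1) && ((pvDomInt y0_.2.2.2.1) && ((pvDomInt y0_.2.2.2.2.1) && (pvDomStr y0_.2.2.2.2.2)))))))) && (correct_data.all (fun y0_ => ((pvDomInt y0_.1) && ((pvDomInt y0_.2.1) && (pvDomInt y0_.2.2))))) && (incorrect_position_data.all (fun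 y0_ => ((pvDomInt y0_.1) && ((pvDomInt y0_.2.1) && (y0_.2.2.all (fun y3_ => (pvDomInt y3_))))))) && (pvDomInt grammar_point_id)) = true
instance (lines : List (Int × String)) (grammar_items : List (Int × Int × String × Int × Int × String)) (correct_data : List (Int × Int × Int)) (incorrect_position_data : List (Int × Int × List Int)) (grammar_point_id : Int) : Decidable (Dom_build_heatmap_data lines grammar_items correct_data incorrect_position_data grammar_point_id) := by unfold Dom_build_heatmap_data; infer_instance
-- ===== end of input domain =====

-- B replaces A's per-span inner loops over nested mutable dicts by a line-major pass: a per-line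
-- difference table + one prefix-sum sweep (objective: alternative; equal return value, no mutation claims).

-- shared helper: Python's `correct_data.get((il, gid), 0)` (dict as assoc list, first match)
def cdLookup (correct_data : List (Int × Int × Int)) (il gid : Int) : Int :=
  (((correct_data.find? (fun q => q.1 == il && q.2.1 == gid)).map (fun q => q.2.2)).getD 0)

-- ===== PORT A =====
-- `{i: {'correct': 0, 'incorrect': 0} for i in range(len(text))}`
def pvInitRow (t : String) : PySem.Dict Int (PySem.Dict String Int) :=
  PySem.Dict.ofList ((PySem.List.pyRange 0 (PySem.Str.len t)).map
    (fun i => (i, PySem.Dict.mk [("correct", (0:Int)), ("incorrect", (0:Int))])))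

-- literal transliteration of A; `heatmap[ln][pos][k] += v` is ported as nested Dict.modify
-- (the defaults are never used on inputs admitted by Pre_: the keys are always present there)
def build_heatmap_data (lines : List (Int × String)) (grammar_items : List (Int × Int × String × Int × Int × String)) (correct_data : List (Int × Int × Int)) (incorrect_position_data : List (Int × Int × List Int)) (grammar_point_id : Int) : List (Int × List (Int × List (String × Int))) :=
  let heat0 : PySem.Dict Int (PySem.Dict Int (PySem.Dict String Int)) :=
    lines.foldl (fun h p => h.insert p.1 (pvInitRow p.2)) PySem.Dict.empty
  let heat1 := grammar_items.foldl (fun h it =>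
    if it.2.1 ≠ grammar_point_id then h
    else
      let c := cdLookup correct_data it.1 it.2.1
      if 0 < c ∧ h.contains it.1 then
        let row := (h.get? it.1).getD PySem.Dict.empty
        let row' := (PySem.List.pyRange it.2.2.2.1 (min it.2.2.2.2.1 (row.size : Int))).foldl
          (fun r pos => r.modify pos PySem.Dict.empty
            (fun cell => cell.modify "correct" 0 (fun x => x + c))) row
        h.insert it.1 row'
      else h) heat0
  let heat2 := incorrect_position_data.foldl (fun h it =>
    if it.2.1 ≠ grammar_point_id then h
    else if it.2.2 ≠ [] ∧ h.contains it.1 then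
      let row := (h.get? it.1).getD PySem.Dict.empty
      let row' := it.2.2.foldl (fun r p =>
        if 0 ≤ p ∧ p < (r.size : Int) then
          r.modify p PySem.Dict.empty (fun cell => cell.modify "incorrect" 0 (fun x => x + 1))
        else r) row
      h.insert it.1 row'
    else h) heat1
  heat2.items.map (fun q => (q.1, q.2.items.map (fun r => (r.1, r.2.items))))

-- ===== PORT B =====
-- literal transliteration of Source B: texts = dict(lines); per line a difference table for correct
-- clicks, a counting array for incorrect clicks, then one prefix-sum sweep emits the row
def build_heatmap_data_alt (lines : List (Int × String)) (grammar_items : List (Int × Int × String × Int × Int × String)) (correct_data : List (Int × Int × Int)) (incorrect_position_data : List (Int × Int × List Int)) (grammar_point_id : Int) : List (Int × List (Int × List (String × Int))) :=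
  let texts : PySem.Dict Int String := lines.foldl (fun d p => d.insert p.1 p.2) PySem.Dict.empty
  texts.items.foldl (fun acc q =>
    let ln := q.1
    let n : Int := PySem.Str.len q.2
    let diff := grammar_items.foldl (fun dl it =>
      if it.2.1 = grammar_point_id ∧ it.1 = ln then
        let c := cdLookup correct_data it.1 it.2.1
        if 0 < c then
          let hi := min it.2.2.2.2.1 n
          if it.2.2.2.1 < hi then
            let d1 := PySem.List.pySetD dl it.2.2.2.1 (PySem.List.pyGetD dl it.2.2.2.1 0 + c)
            PySem.List.pySetD d1 hi (PySem.List.pyGetD d1 hi 0 - c)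
          else dl
        else dl
      else dl) (List.replicate (n.toNat + 1) (0:Int))
    let inc := incorrect_position_data.foldl (fun al it =>
      if it.2.1 = grammar_point_id ∧ it.1 = ln then
        it.2.2.foldl (fun al2 p =>
          if 0 ≤ p ∧ p < n then PySem.List.pySetD al2 p (PySem.List.pyGetD al2 p 0 + 1) else al2) al
      else al) (List.replicate n.toNat (0:Int))
    let st := (PySem.List.pyRange 0 n).foldl (fun st i =>
      let run := st.1 + PySem.List.pyGetD diff i 0
      (run, st.2 ++ [(i, [("correct", run), ("incorrect", PySem.List.pyGetD inc i 0)])]))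
      ((0:Int), ([] : List (Int × List (String × Int))))
    acc ++ [(ln, st.2)]) []

-- ===== PRECONDITION & SPEC =====
-- Pre_ excludes exactly the inputs on which A raises KeyError: a grammar item of the requested
-- grammar point with positive correct count, a line present in the heatmap, a NEGATIVE pos_start
-- and a nonempty span (A indexes heatmap[line][pos_start] with pos_start < 0).
def Pre_build_heatmap_data (lines : List (Int × String)) (grammar_items : List (Int × Int × String × Int × Int × String)) (correct_data : List (Int × Int × Int)) (incorrect_position_data : List (Int × Int × List Int)) (grammar_point_id : Int) : Prop :=
  ∀ it ∈ grammar_items, it.2.1 = grammar_point_id → it.2.2.2.1 < 0 →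
    ¬(0 < cdLookup correct_data it.1 it.2.1 ∧ it.1 ∈ lines.map Prod.fst ∧ it.2.2.2.1 < it.2.2.2.2.1)
instance (lines : List (Int × String)) (grammar_items : List (Int × Int × String × Int × Int × String)) (correct_data : List (Int × Int × Int)) (incorrect_position_data : List (Int × Int × List Int)) (grammar_point_id : Int) : Decidable (Pre_build_heatmap_data lines grammar_items correct_data incorrect_position_data grammar_point_id) := by unfold Pre_build_heatmap_data; infer_instance

def pvWitness_build_heatmap_data : (List (Int × String)) × (List (Int × Int × String × Int × Int × String)) × (List (Int × Int × Int)) × (List (Int × Int × List Int)) × Int :=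
  ([(1, "ab")], [(1, 2, "x", 0, 2, "g")], [(1, 2, 3)], [(1, 2, [0])], 2)

def Spec_build_heatmap_data (lines : List (Int × String)) (grammar_items : List (Int × Int × String × Int × Int × String)) (correct_data : List (Int × Int × Int)) (incorrect_position_data : List (Int × Int × List Int)) (grammar_point_id : Int) (out : List (Int × List (Int × List (String × Int)))) : Prop := out = build_heatmap_data_alt lines grammar_items correct_data incorrect_position_data grammar_point_id
instance (lines : List (Int × String)) (grammar_items : List (Int × Int × String × Int × Int × String)) (correct_data : List (Int × Int × Int)) (incorrect_position_data : List (Int × Int × List Int)) (grammar_point_id : Int) (out : List (Int × List (Int × List (String × Int)))) : Decidable (Spec_build_heatmap_data lines grammar_items correct_data incorrect_position_data grammar_point_id out) := by unfold Spec_build_heatmap_data; infer_instance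

-- ===== CLAIM (what is proved, stated in full; the proofs are below) =====
def Claim_equal_build_heatmap_data : Prop := ∀ (lines : List (Int × String)) (grammar_items : List (Int × Int × String × Int × Int × String)) (correct_data : List (Int × Int × Int)) (incorrect_position_data : List (Int × Int × List Int)) (grammar_point_id : Int), Dom_build_heatmap_data lines grammar_items correct_data incorrect_position_data grammar_point_id → Pre_build_heatmap_data lines grammar_items correct_data incorrect_position_data grammar_point_id → Spec_build_heatmap_data lines grammar_items correct_data incorrect_position_data grammar_point_id (build_heatmap_data lines grammar_items correct_data incorrect_position_data grammar_point_id)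

-- ===== LEMMAS AND PROOFS =====

-- the common midpoint both ports are reduced to
def pvT (lines : List (Int × String)) : PySem.Dict Int String :=
  lines.foldl (fun d p => d.insert p.1 p.2) PySem.Dict.empty

def pvCell (a b : Int) : PySem.Dict String Int := PySem.Dict.mk [("correct", a), ("incorrect", b)]

def pvCrow (n : Int) (f g : Int → Int) : PySem.Dict Int (PySem.Dict String Int) :=
  PySem.Dict.mk ((PySem.List.pyRange 0 n).map (fun i => (i, pvCell (f i) (g i))))

def pvContrib (cd : List (Int × Int × Int)) (gp ln n : Int) (it : Int × Int × String × Int × Int × String) (i : Int) : Int :=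
  if it.2.1 = gp ∧ it.1 = ln ∧ 0 < cdLookup cd it.1 it.2.1 ∧ it.2.2.2.1 ≤ i ∧ i < min it.2.2.2.2.1 n
  then cdLookup cd it.1 it.2.1 else 0

def pvCorr (gis : List (Int × Int × String × Int × Int × String)) (cd : List (Int × Int × Int)) (gp ln n i : Int) : Int :=
  (gis.map (fun it => pvContrib cd gp ln n it i)).sum

def pvIncv (ipd : List (Int × Int × List Int)) (gp ln i : Int) : Int :=
  (ipd.map (fun it => if it.2.1 = gp ∧ it.1 = ln then (it.2.2.count i : Int) else 0)).sum

def pvOut (lines : List (Int × String)) (gis : List (Int × Int × String × Int × Int × String)) (cd : List (Int × Int × Int)) (ipd : List (Int × Int × List Int)) (gp : Int) : List (Int × List (Int × List (String × Int))) :=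
  (pvT lines).items.map (fun q => (q.1, (PySem.List.pyRange 0 (PySem.Str.len q.2)).map
    (fun i => (i, [("correct", pvCorr gis cd gp q.1 (PySem.Str.len q.2) i),
                   ("incorrect", pvIncv ipd gp q.1 i)]))))



def pvDContrib (cd : List (Int × Int × Int)) (gp ln n : Int) (it : Int × Int × String × Int × Int × String) (j : Int) : Int :=
  if it.2.1 = gp ∧ it.1 = ln ∧ 0 < cdLookup cd it.1 it.2.1 ∧ it.2.2.2.1 < min it.2.2.2.2.1 n then
    (if it.2.2.2.1 = j then cdLookup cd it.1 it.2.1 else 0)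
      + (if min it.2.2.2.2.1 n = j then -(cdLookup cd it.1 it.2.1) else 0)
  else 0

theorem pvGetD_replicate (m : Nat) (j : Int) (hj : 0 ≤ j) :
    PySem.List.pyGetD (List.replicate m (0:Int)) j 0 = 0 := by
  rw [PySem.List.pyGetD_of_nonneg _ _ hj]
  simp only [List.getD, List.getElem?_replicate]
  by_cases h : j.toNat < m
  · simp [h]
  · simp [h]

theorem pvGetSet (dl : List Int) (k j v : Int) (hk0 : 0 ≤ k) (hk : k < (dl.length : Int)) (hj : 0 ≤ j) :
    PySem.List.pyGetD (PySem.List.pySetD dl k v) j 0 = if j = k then v else PySem.List.pyGetD dl j 0 := by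
  rw [PySem.List.pySetD_of_nonneg _ _ hk0, PySem.List.pyGetD_of_nonneg _ _ hj,
    PySem.List.pyGetD_of_nonneg _ _ hj]
  have hkn : k.toNat < dl.length := by omega
  simp only [List.getD, List.getElem?_set]
  by_cases h : j = k
  · subst h; simp [hkn]
  · have h2 : k.toNat ≠ j.toNat := by omega
    simp [h2, h]

theorem pvDiff_val (cd : List (Int × Int × Int)) (gp ln n : Int)
    (gis : List (Int × Int × String × Int × Int × String))
    (hps : ∀ it ∈ gis, it.2.1 = gp → it.1 = ln → 0 < cdLookup cd it.1 it.2.1 →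
           it.2.2.2.1 < min it.2.2.2.2.1 n → 0 ≤ it.2.2.2.1) :
    ∀ (dl : List Int), dl.length = n.toNat + 1 →
    ∀ j, 0 ≤ j → j ≤ n →
    PySem.List.pyGetD (gis.foldl (fun dl it =>
      if it.2.1 = gp ∧ it.1 = ln then
        if 0 < cdLookup cd it.1 it.2.1 then
          if it.2.2.2.1 < min it.2.2.2.2.1 n then
            PySem.List.pySetD
              (PySem.List.pySetD dl it.2.2.2.1 (PySem.List.pyGetD dl it.2.2.2.1 0 + cdLookup cd it.1 it.2.1))
              (min it.2.2.2.2.1 n)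
              (PySem.List.pyGetD
                (PySem.List.pySetD dl it.2.2.2.1 (PySem.List.pyGetD dl it.2.2.2.1 0 + cdLookup cd it.1 it.2.1))
                (min it.2.2.2.2.1 n) 0 - cdLookup cd it.1 it.2.1)
          else dl
        else dl
      else dl) dl) j 0
      = PySem.List.pyGetD dl j 0 + (gis.map (fun it => pvDContrib cd gp ln n it j)).sum := by
  induction gis with
  | nil => intro dl _ j _ _; simp
  | cons it rest ih =>
    intro dl hlen j hj0 hjn
    have hn : 0 ≤ n := by omega
    simp only [List.foldl_cons, List.map_cons, List.sum_cons]
    by_cases hg : it.2.1 = gp ∧ it.1 = ln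
    · by_cases hc : 0 < cdLookup cd it.1 it.2.1
      · by_cases hr : it.2.2.2.1 < min it.2.2.2.2.1 n
        · have hps0 : 0 ≤ it.2.2.2.1 := hps it (by simp) hg.1 hg.2 hc hr
          have hhi0 : 0 ≤ min it.2.2.2.2.1 n := by omega
          have hlt : it.2.2.2.1 < n := by omega
          rw [if_pos hg, if_pos hc, if_pos hr]
          set c := cdLookup cd it.1 it.2.1 with hcdef
          set ps := it.2.2.2.1 with hpsdef
          set hi := min it.2.2.2.2.1 n with hhidef
          have hlen1 : (PySem.List.pySetD dl ps (PySem.List.pyGetD dl ps 0 + c)).length = dl.length :=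
            PySem.List.length_pySetD dl ps _
          rw [ih (fun x hx hx1 hx2 hx3 hx4 => hps x (by simp [hx]) hx1 hx2 hx3 hx4)
              _ (by rw [PySem.List.length_pySetD, hlen1, hlen]) j hj0 hjn]
          have e2 := pvGetSet (PySem.List.pySetD dl ps (PySem.List.pyGetD dl ps 0 + c)) hi j
            (PySem.List.pyGetD (PySem.List.pySetD dl ps (PySem.List.pyGetD dl ps 0 + c)) hi 0 - c)
            hhi0 (by rw [hlen1, hlen]; push_cast; omega) hj0
          have e1 := fun (jj : Int) (hjj : 0 ≤ jj) (hjl : jj < n + 1) =>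
            pvGetSet dl ps jj (PySem.List.pyGetD dl ps 0 + c) hps0 (by rw [hlen]; push_cast; omega) hjj
          rw [e2, e1 j hj0 (by omega), e1 hi hhi0 (by omega)]
          simp only [pvDContrib, if_pos (And.intro hg.1 (And.intro hg.2 (And.intro hc hr))), ← hcdef,
            ← hpsdef, ← hhidef]
          have hne : ps ≠ hi := by omega
          by_cases h1 : j = hi
          · subst h1
            split_ifs <;> first | ring1 | (exfalso; omega)
          · by_cases h2 : j = ps
            · subst h2
              split_ifs <;> first | ring1 | (exfalso; omega)
            · split_ifs <;> first | ring1 | (exfalso; omega)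
        · rw [if_pos hg, if_pos hc, if_neg hr,
            ih (fun x hx hx1 hx2 hx3 hx4 => hps x (by simp [hx]) hx1 hx2 hx3 hx4) dl hlen j hj0 hjn]
          have hz : pvDContrib cd gp ln n it j = 0 := by
            unfold pvDContrib; rw [if_neg]; intro hh; exact hr hh.2.2.2
          rw [hz]
          ring1
      · rw [if_pos hg, if_neg hc,
          ih (fun x hx hx1 hx2 hx3 hx4 => hps x (by simp [hx]) hx1 hx2 hx3 hx4) dl hlen j hj0 hjn]
        have hz : pvDContrib cd gp ln n it j = 0 := by
          unfold pvDContrib; rw [if_neg]; intro hh; exact hc hh.2.2.1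
        rw [hz]
        ring1
    · rw [if_neg hg,
        ih (fun x hx hx1 hx2 hx3 hx4 => hps x (by simp [hx]) hx1 hx2 hx3 hx4) dl hlen j hj0 hjn]
      have hz : pvDContrib cd gp ln n it j = 0 := by
        unfold pvDContrib; rw [if_neg]; intro hh; exact hg (And.intro hh.1 hh.2.1)
      rw [hz]
      ring1

theorem pvInc_inner (n : Int) :
    ∀ (poss : List Int) (al : List Int), al.length = n.toNat →
    ∀ j, 0 ≤ j → j < n →
    PySem.List.pyGetD (poss.foldl (fun al2 p =>
        if 0 ≤ p ∧ p < n then PySem.List.pySetD al2 p (PySem.List.pyGetD al2 p 0 + 1) else al2) al) j 0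
      = PySem.List.pyGetD al j 0 + (poss.count j : Int) := by
  intro poss
  induction poss with
  | nil => intro al _ j _ _; simp
  | cons p rest ih =>
    intro al hlen j hj0 hjn
    simp only [List.foldl_cons]
    by_cases hp : 0 ≤ p ∧ p < n
    · rw [if_pos hp, ih _ (by rw [PySem.List.length_pySetD, hlen]) j hj0 hjn,
        pvGetSet al p j _ hp.1 (by rw [hlen]; omega) hj0]
      by_cases h : j = p
      · subst h
        rw [if_pos rfl, List.count_cons]
        simp
        push_cast; ring1
      · rw [if_neg h, List.count_cons]
        simp [h, Ne.symm h]
    · have hnp : j ≠ p := by intro h; subst h; exact hp (And.intro hj0 hjn)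
      rw [if_neg hp, ih _ hlen j hj0 hjn, List.count_cons]
      simp [hnp, Ne.symm hnp]

theorem pvInc_inner_len (n : Int) (poss al : List Int) :
    (poss.foldl (fun al2 p =>
        if 0 ≤ p ∧ p < n then PySem.List.pySetD al2 p (PySem.List.pyGetD al2 p 0 + 1) else al2) al).length
      = al.length := by
  induction poss generalizing al with
  | nil => rfl
  | cons p rest ih =>
    simp only [List.foldl_cons]
    by_cases hp : 0 ≤ p ∧ p < n
    · rw [if_pos hp, ih, PySem.List.length_pySetD]
    · rw [if_neg hp, ih]

theorem pvInc_val (gp ln n : Int) (ipd : List (Int × Int × List Int)) :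
    ∀ (al : List Int), al.length = n.toNat →
    ∀ j, 0 ≤ j → j < n →
    PySem.List.pyGetD (ipd.foldl (fun al it =>
      if it.2.1 = gp ∧ it.1 = ln then
        it.2.2.foldl (fun al2 p =>
          if 0 ≤ p ∧ p < n then PySem.List.pySetD al2 p (PySem.List.pyGetD al2 p 0 + 1) else al2) al
      else al) al) j 0
      = PySem.List.pyGetD al j 0 + pvIncv ipd gp ln j := by
  induction ipd with
  | nil => intro al _ j _ _; simp [pvIncv]
  | cons it rest ih =>
    intro al hlen j hj0 hjn
    simp only [List.foldl_cons, pvIncv, List.map_cons, List.sum_cons]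
    by_cases hg : it.2.1 = gp ∧ it.1 = ln
    · rw [if_pos hg, ih _ (by rw [pvInc_inner_len, hlen]) j hj0 hjn,
        pvInc_inner n it.2.2 al hlen j hj0 hjn, if_pos hg]
      simp only [pvIncv]; ring
    · rw [if_neg hg, ih _ hlen j hj0 hjn, if_neg hg]
      simp only [pvIncv]; ring

theorem pvPrefix (diff inc : List Int) :
    ∀ (m : Nat),
    (PySem.List.pyRange 0 (m:Int)).foldl (fun st i =>
      (st.1 + PySem.List.pyGetD diff i 0, st.2 ++ [(i,
        [("correct", st.1 + PySem.List.pyGetD diff i 0), ("incorrect", PySem.List.pyGetD inc i 0)])]))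
      ((0:Int), ([] : List (Int × List (String × Int))))
    = (((PySem.List.pyRange 0 (m:Int)).map (fun j => PySem.List.pyGetD diff j 0)).sum,
       (PySem.List.pyRange 0 (m:Int)).map (fun i => (i,
         [("correct", ((PySem.List.pyRange 0 (i+1)).map (fun j => PySem.List.pyGetD diff j 0)).sum),
          ("incorrect", PySem.List.pyGetD inc i 0)]))) := by
  intro m
  induction m with
  | zero => simp [PySem.List.pyRange_one_eq_nil]
  | succ m ih =>
    have hcast : ((m + 1 : Nat) : Int) = (m : Int) + 1 := by push_cast; ring
    rw [hcast, PySem.List.pyRange_one_succ_right (by positivity), List.foldl_append, ih,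
      List.map_append, List.map_append, List.sum_append]
    simp
    rw [PySem.List.pyRange_one_succ_right (by positivity), List.map_append, List.sum_append]
    simp [PySem.List.pyGetD_natCast, List.getD]

theorem pvPrefixI (diff inc : List Int) (n : Int) (hn : 0 ≤ n) :
    (PySem.List.pyRange 0 n).foldl (fun st i =>
      (st.1 + PySem.List.pyGetD diff i 0, st.2 ++ [(i,
        [("correct", st.1 + PySem.List.pyGetD diff i 0), ("incorrect", PySem.List.pyGetD inc i 0)])]))
      ((0:Int), ([] : List (Int × List (String × Int))))
    = (((PySem.List.pyRange 0 n).map (fun j => PySem.List.pyGetD diff j 0)).sum,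
       (PySem.List.pyRange 0 n).map (fun i => (i,
         [("correct", ((PySem.List.pyRange 0 (i+1)).map (fun j => PySem.List.pyGetD diff j 0)).sum),
          ("incorrect", PySem.List.pyGetD inc i 0)]))) := by
  have h := pvPrefix diff inc n.toNat
  rw [Int.toNat_of_nonneg hn] at h
  exact h

theorem pvSumInd (v c : Int) : ∀ (b a : Int),
    ((PySem.List.pyRange a b).map (fun j => if v = j then c else 0)).sum
      = if a ≤ v ∧ v < b then c else 0 := by
  intro b
  suffices h : ∀ (k : Nat) (a : Int), (b - a).toNat = k →
      ((PySem.List.pyRange a b).map (fun j => if v = j then c else 0)).sum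
        = if a ≤ v ∧ v < b then c else 0 by
    intro a; exact h _ a rfl
  intro k
  induction k with
  | zero =>
    intro a hk
    rw [PySem.List.pyRange_one_eq_nil (by omega)]
    simp; omega
  | succ k ih =>
    intro a hk
    rw [PySem.List.pyRange_one_cons (by omega), List.map_cons, List.sum_cons,
      ih (a+1) (by omega)]
    by_cases h : v = a
    · subst h
      rw [if_pos rfl, if_neg (by omega), if_pos (by omega)]
      ring1
    · rw [if_neg h]
      by_cases h2 : a + 1 ≤ v ∧ v < b
      · rw [if_pos h2, if_pos (by omega)]
        ring1
      · rw [if_neg h2, if_neg (by omega)]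
        ring1

theorem pvSwap (cd : List (Int × Int × Int)) (gp ln n : Int)
    (gis : List (Int × Int × String × Int × Int × String))
    (hps : ∀ it ∈ gis, it.2.1 = gp → it.1 = ln → 0 < cdLookup cd it.1 it.2.1 →
           it.2.2.2.1 < min it.2.2.2.2.1 n → 0 ≤ it.2.2.2.1)
    (i : Int) (h0 : 0 ≤ i) (hi : i < n) :
    ((PySem.List.pyRange 0 (i+1)).map (fun j => (gis.map (fun it => pvDContrib cd gp ln n it j)).sum)).sum
      = pvCorr gis cd gp ln n i := by
  induction gis with
  | nil => simp [pvCorr]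
  | cons it rest ih =>
    simp only [List.map_cons, List.sum_cons, pvCorr]
    have hsplit : ((PySem.List.pyRange 0 (i+1)).map
        (fun j => pvDContrib cd gp ln n it j + (rest.map (fun x => pvDContrib cd gp ln n x j)).sum)).sum
      = ((PySem.List.pyRange 0 (i+1)).map (fun j => pvDContrib cd gp ln n it j)).sum
        + ((PySem.List.pyRange 0 (i+1)).map (fun j => (rest.map (fun x => pvDContrib cd gp ln n x j)).sum)).sum :=
      PySem.List.sum_map_add_int _ _ _
    rw [hsplit, ih (fun x hx hx1 hx2 hx3 hx4 => hps x (by simp [hx]) hx1 hx2 hx3 hx4)]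
    simp only [pvCorr]
    congr 1
    by_cases hg : it.2.1 = gp ∧ it.1 = ln ∧ 0 < cdLookup cd it.1 it.2.1 ∧ it.2.2.2.1 < min it.2.2.2.2.1 n
    · have hps0 : 0 ≤ it.2.2.2.1 := hps it (by simp) hg.1 hg.2.1 hg.2.2.1 hg.2.2.2
      simp only [pvDContrib, if_pos hg]
      have e : ((PySem.List.pyRange 0 (i+1)).map (fun j =>
          (if it.2.2.2.1 = j then cdLookup cd it.1 it.2.1 else 0)
            + (if min it.2.2.2.2.1 n = j then -(cdLookup cd it.1 it.2.1) else 0))).sum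
        = ((PySem.List.pyRange 0 (i+1)).map (fun j => if it.2.2.2.1 = j then cdLookup cd it.1 it.2.1 else 0)).sum
          + ((PySem.List.pyRange 0 (i+1)).map (fun j => if min it.2.2.2.2.1 n = j then -(cdLookup cd it.1 it.2.1) else 0)).sum :=
        PySem.List.sum_map_add_int _ _ _
      rw [e, pvSumInd, pvSumInd]
      simp only [pvContrib]
      have h1 := hg.2.2.1
      have h2 := hg.2.2.2
      have h3 := hg.1
      have h4 := hg.2.1
      split_ifs <;> omega
    · simp only [pvDContrib, if_neg hg, pvContrib]
      rw [if_neg (by intro hh; exact hg (And.intro hh.1 (And.intro hh.2.1 (And.intro hh.2.2.1 (by omega)))))]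
      simp


-- ===== A-side lemmas =====

theorem pvCell_mod_corr (a b c : Int) :
    (PySem.Dict.mk [("correct", a), ("incorrect", b)]).modify "correct" 0 (fun x => x + c)
      = PySem.Dict.mk [("correct", a + c), ("incorrect", b)] := rfl

theorem pvCell_mod_inc (a b c : Int) :
    (PySem.Dict.mk [("correct", a), ("incorrect", b)]).modify "incorrect" 0 (fun x => x + c)
      = PySem.Dict.mk [("correct", a), ("incorrect", b + c)] := rfl

theorem pvCrow_keys (n : Int) (f g : Int → Int) :
    (pvCrow n f g).keys = PySem.List.pyRange 0 n := by
  unfold pvCrow PySem.Dict.keys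
  rw [List.map_map]
  exact List.map_id _

theorem pvCrow_nodup (n : Int) (f g : Int → Int) : (pvCrow n f g).keys.Nodup := by
  rw [pvCrow_keys]; exact PySem.List.nodup_pyRange_one 0 n

theorem pvCrow_get (n : Int) (f g : Int → Int) (i : Int) (h0 : 0 ≤ i) (h1 : i < n) :
    (pvCrow n f g).get? i = some (pvCell (f i) (g i)) := by
  apply PySem.Dict.get?_of_mem_items _ _ (pvCrow_nodup n f g)
  unfold pvCrow
  simp only [PySem.Dict.items]
  exact List.mem_map_of_mem (PySem.List.mem_pyRange_one.mpr ⟨h0, h1⟩)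

theorem pvCrow_size (n : Int) (hn : 0 ≤ n) (f g : Int → Int) :
    ((pvCrow n f g).size : Int) = n := by
  unfold pvCrow PySem.Dict.size
  simp only [PySem.Dict.items, List.length_map, PySem.List.length_pyRange_one]
  omega

theorem pvCrow_congr (n : Int) (f g f' g' : Int → Int)
    (hf : ∀ j, 0 ≤ j → j < n → f j = f' j) (hg : ∀ j, 0 ≤ j → j < n → g j = g' j) :
    pvCrow n f g = pvCrow n f' g' := by
  unfold pvCrow
  congr 1
  apply List.map_congr_left
  intro j hj
  obtain ⟨h0, h1⟩ := PySem.List.mem_pyRange_one.mp hj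
  rw [hf j h0 h1, hg j h0 h1]

theorem pvCrow_contains (n : Int) (f g : Int → Int) (i : Int) (h0 : 0 ≤ i) (h1 : i < n) :
    (pvCrow n f g).contains i = true := by
  rw [PySem.Dict.contains_eq_decide_mem_keys, pvCrow_keys]
  simp [PySem.List.mem_pyRange_one]
  omega

theorem pvCrow_mod_corr (n : Int) (f g : Int → Int) (i c : Int) (h0 : 0 ≤ i) (h1 : i < n) :
    (pvCrow n f g).modify i PySem.Dict.empty (fun cell => cell.modify "correct" 0 (fun x => x + c))
      = pvCrow n (fun j => if j = i then f j + c else f j) g := by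
  unfold PySem.Dict.modify
  rw [PySem.Dict.getD_eq_get?_getD, pvCrow_get n f g i h0 h1]
  have hcell : (pvCell (f i) (g i)).modify "correct" 0 (fun x => x + c) = pvCell (f i + c) (g i) :=
    pvCell_mod_corr _ _ _
  apply PySem.Dict.ext
  rw [PySem.Dict.items_insert_of_contains _ _ (pvCrow_contains n f g i h0 h1)]
  unfold pvCrow
  simp only [PySem.Dict.items, List.map_map]
  apply List.map_congr_left
  intro j hj
  simp only [Function.comp]
  by_cases h : j = i
  · subst h
    have hv : ((pvCell (f j) (g j)).insert "correct" ((pvCell (f j) (g j)).getD "correct" 0 + c))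
        = pvCell (f j + c) (g j) := rfl
    simp [hv]
  · simp [h, Ne.symm h]

theorem pvCrow_mod_inc (n : Int) (f g : Int → Int) (i : Int) (h0 : 0 ≤ i) (h1 : i < n) :
    (pvCrow n f g).modify i PySem.Dict.empty (fun cell => cell.modify "incorrect" 0 (fun x => x + 1))
      = pvCrow n f (fun j => if j = i then g j + 1 else g j) := by
  unfold PySem.Dict.modify
  rw [PySem.Dict.getD_eq_get?_getD, pvCrow_get n f g i h0 h1]
  have hcell : (pvCell (f i) (g i)).modify "incorrect" 0 (fun x => x + 1) = pvCell (f i) (g i + 1) :=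
    pvCell_mod_inc _ _ _
  apply PySem.Dict.ext
  rw [PySem.Dict.items_insert_of_contains _ _ (pvCrow_contains n f g i h0 h1)]
  unfold pvCrow
  simp only [PySem.Dict.items, List.map_map]
  apply List.map_congr_left
  intro j hj
  simp only [Function.comp]
  by_cases h : j = i
  · subst h
    have hv : ((pvCell (f j) (g j)).insert "incorrect" ((pvCell (f j) (g j)).getD "incorrect" 0 + 1))
        = pvCell (f j) (g j + 1) := rfl
    simp [hv]
  · simp [h, Ne.symm h]

theorem pvRowFold_corr (n c : Int) : ∀ (k : Nat) (a b : Int), (b - a).toNat = k → b ≤ n → (0 ≤ a ∨ b ≤ a) →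
    ∀ (f g : Int → Int),
    (PySem.List.pyRange a b).foldl (fun r pos => r.modify pos PySem.Dict.empty
        (fun cell => cell.modify "correct" 0 (fun x => x + c))) (pvCrow n f g)
      = pvCrow n (fun j => f j + if a ≤ j ∧ j < b then c else 0) g := by
  intro k
  induction k with
  | zero =>
    intro a b hk hbn hab f g
    rw [PySem.List.pyRange_one_eq_nil (by omega), List.foldl_nil]
    exact pvCrow_congr n f g _ _ (fun j h0 h1 => by split_ifs <;> first | ring1 | (exfalso; omega)) (fun _ _ _ => rfl)
  | succ k ih =>
    intro a b hk hbn hab f g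
    have ha0 : 0 ≤ a := by omega
    rw [PySem.List.pyRange_one_cons (by omega), List.foldl_cons,
      pvCrow_mod_corr n f g a c ha0 (by omega),
      ih (a+1) b (by omega) hbn (by omega) _ g]
    exact pvCrow_congr n _ _ _ _
      (fun j h0 h1 => by split_ifs <;> first | ring1 | (exfalso; omega))
      (fun _ _ _ => rfl)

theorem pvRowFold_inc (n : Int) (hn : 0 ≤ n) (f : Int → Int) : ∀ (poss : List Int) (g : Int → Int),
    poss.foldl (fun r p => if 0 ≤ p ∧ p < (r.size : Int) then
        r.modify p PySem.Dict.empty (fun cell => cell.modify "incorrect" 0 (fun x => x + 1))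
      else r) (pvCrow n f g)
      = pvCrow n f (fun j => g j + (poss.count j : Int)) := by
  intro poss
  induction poss with
  | nil =>
    intro g
    rw [List.foldl_nil]
    apply pvCrow_congr
    · intro _ _ _; rfl
    · intro j _ _; simp
  | cons p rest ih =>
    intro g
    rw [List.foldl_cons, pvCrow_size n hn f g]
    by_cases hp : 0 ≤ p ∧ p < n
    · rw [if_pos hp, pvCrow_mod_inc n f g p hp.1 hp.2, ih]
      apply pvCrow_congr
      · intro _ _ _; rfl
      · intro j h0 h1
        by_cases h : j = p
        · subst h
          rw [List.count_cons]
          simp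
          try push_cast
          try ring1
          try omega
        · rw [List.count_cons]
          simp [h, Ne.symm h]
    · rw [if_neg hp, ih]
      apply pvCrow_congr
      · intro _ _ _; rfl
      · intro j h0 h1
        have hnp : j ≠ p := by intro h; subst h; exact hp ⟨h0, h1⟩
        rw [List.count_cons]
        simp [hnp, Ne.symm hnp]

-- invariant-transported insert: overwriting an existing key in a dict whose items are L.map …
theorem pvItems_any (h : PySem.Dict Int (PySem.Dict Int (PySem.Dict String Int)))
    (L : List (Int × String)) (R : Int × String → PySem.Dict Int (PySem.Dict String Int))
    (hh : h.items = L.map (fun q => (q.1, R q))) (k : Int) :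
    h.contains k = L.any (fun q => q.1 == k) := by
  unfold PySem.Dict.contains
  rw [hh, List.any_map]
  rfl

theorem pvInsert_upd (h : PySem.Dict Int (PySem.Dict Int (PySem.Dict String Int)))
    (L : List (Int × String)) (R R' : Int × String → PySem.Dict Int (PySem.Dict String Int))
    (hh : h.items = L.map (fun q => (q.1, R q))) (k : Int) (v : PySem.Dict Int (PySem.Dict String Int))
    (hk : h.contains k = true)
    (hcompat : ∀ q ∈ L, (q.1 = k → v = R' q) ∧ (q.1 ≠ k → R q = R' q)) :
    (h.insert k v).items = L.map (fun q => (q.1, R' q)) := by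
  rw [PySem.Dict.items_insert_of_contains _ _ hk, hh, List.map_map]
  apply List.map_congr_left
  intro q hq
  simp only [Function.comp]
  by_cases h1 : q.1 = k
  · simp only [h1, beq_self_eq_true, if_pos]
    rw [← h1, ((hcompat q hq).1 h1)]
  · simp only [beq_eq_false_iff_ne, ne_eq, h1, not_false_eq_true, if_neg, beq_iff_eq]
    rw [(hcompat q hq).2 h1]

theorem pvNodupVal : ∀ (L : List (Int × String)), (L.map Prod.fst).Nodup →
    ∀ {k : Int} {t t' : String}, (k, t) ∈ L → (k, t') ∈ L → t = t' := by
  intro L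
  induction L with
  | nil => intro _ _ _ _ h1 _; cases h1
  | cons p rest ih =>
    intro hnd k t t' h1 h2
    simp only [List.map_cons, List.nodup_cons] at hnd
    rcases List.mem_cons.mp h1 with e1 | m1 <;> rcases List.mem_cons.mp h2 with e2 | m2
    · exact congrArg Prod.snd (e1.trans e2.symm)
    · exfalso
      have hk : k ∈ rest.map Prod.fst := List.mem_map_of_mem m2
      rw [← e1] at hnd
      exact hnd.1 hk
    · exfalso
      have hk : k ∈ rest.map Prod.fst := List.mem_map_of_mem m1
      rw [← e2] at hnd
      exact hnd.1 hk
    · exact ih hnd.2 m1 m2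


theorem pvPairCongr {B : Type} (k : Int) {A A' : B} (h : A = A') : ((k, A) : Int × B) = (k, A') := by
  rw [h]

theorem pvInitRow_eq (t : String) :
    pvInitRow t = pvCrow (PySem.Str.len t) (fun _ => 0) (fun _ => 0) := by
  unfold pvInitRow PySem.Dict.ofList PySem.Dict.update
  apply PySem.Dict.ext
  rw [PySem.Dict.items_foldl_insert_fresh _ Prod.fst Prod.snd PySem.Dict.empty
    (fun a _ => by simp [PySem.Dict.contains_empty])
    (by rw [List.map_map]
        have : (Prod.fst ∘ fun i => ((i : Int), PySem.Dict.mk [("correct", (0:Int)), ("incorrect", (0:Int))])) = id := rfl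
        rw [this, List.map_id]
        exact PySem.List.nodup_pyRange_one _ _)]
  unfold pvCrow pvCell
  simp [PySem.Dict.empty, Function.comp_def]

theorem pvInit (lines : List (Int × String)) :
    ∀ (d : PySem.Dict Int String) (h : PySem.Dict Int (PySem.Dict Int (PySem.Dict String Int))),
    h.items = d.items.map (fun q => (q.1, pvInitRow q.2)) →
    (lines.foldl (fun h p => h.insert p.1 (pvInitRow p.2)) h).items
      = ((lines.foldl (fun d p => d.insert p.1 p.2) d).items).map (fun q => (q.1, pvInitRow q.2)) := by
  induction lines with
  | nil => intro d h hh; simpa using hh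
  | cons p rest ih =>
    intro d h hh
    simp only [List.foldl_cons]
    apply ih
    have hcont : h.contains p.1 = d.contains p.1 := by
      unfold PySem.Dict.contains
      rw [hh, List.any_map]
      rfl
    by_cases hc : d.contains p.1 = true
    · rw [PySem.Dict.items_insert_of_contains _ _ (by rw [hcont]; exact hc),
        PySem.Dict.items_insert_of_contains _ _ hc, hh, List.map_map, List.map_map]
      apply List.map_congr_left
      intro q hq
      simp only [Function.comp]
      by_cases h1 : q.1 = p.1
      · simp [h1]
      · simp [h1]
    · have hc' : d.contains p.1 = false := by revert hc; cases d.contains p.1 <;> simp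
      rw [PySem.Dict.items_insert_of_not_contains _ _ (by rw [hcont]; exact hc'),
        PySem.Dict.items_insert_of_not_contains _ _ hc', hh, List.map_append]
      rfl

theorem pvPhase1 (cd : List (Int × Int × Int)) (gp : Int) (L : List (Int × String))
    (hnd : (L.map Prod.fst).Nodup)
    (gis : List (Int × Int × String × Int × Int × String))
    (hpre : ∀ it ∈ gis, it.2.1 = gp → it.2.2.2.1 < 0 →
      ¬(0 < cdLookup cd it.1 it.2.1 ∧ it.1 ∈ L.map Prod.fst ∧ it.2.2.2.1 < it.2.2.2.2.1)) :
    ∀ (F G : Int × String → Int → Int)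
      (h : PySem.Dict Int (PySem.Dict Int (PySem.Dict String Int))),
    h.items = L.map (fun q => (q.1, pvCrow (PySem.Str.len q.2) (F q) (G q))) →
    (gis.foldl (fun h it =>
      if it.2.1 ≠ gp then h
      else
        if 0 < cdLookup cd it.1 it.2.1 ∧ h.contains it.1 then
          h.insert it.1 ((PySem.List.pyRange it.2.2.2.1
              (min it.2.2.2.2.1 ((((h.get? it.1).getD PySem.Dict.empty).size : Int)))).foldl
            (fun r pos => r.modify pos PySem.Dict.empty
              (fun cell => cell.modify "correct" 0 (fun x => x + cdLookup cd it.1 it.2.1)))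
            ((h.get? it.1).getD PySem.Dict.empty))
        else h) h).items
      = L.map (fun q => (q.1, pvCrow (PySem.Str.len q.2)
          (fun i => F q i + pvCorr gis cd gp q.1 (PySem.Str.len q.2) i) (G q))) := by
  induction gis with
  | nil =>
    intro F G h hh
    rw [List.foldl_nil, hh]
    apply List.map_congr_left
    intro q hq
    apply pvPairCongr
    apply pvCrow_congr
    · intro j _ _
      simp [pvCorr]
    · intro _ _ _; rfl
  | cons it rest ih =>
    intro F G h hh
    have hpre' : ∀ x ∈ rest, x.2.1 = gp → x.2.2.2.1 < 0 →
        ¬(0 < cdLookup cd x.1 x.2.1 ∧ x.1 ∈ L.map Prod.fst ∧ x.2.2.2.1 < x.2.2.2.2.1) :=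
      fun x hx => hpre x (by simp [hx])
    simp only [List.foldl_cons]
    by_cases hgid : it.2.1 ≠ gp
    · rw [if_pos hgid, ih hpre' F G h hh]
      apply List.map_congr_left
      intro q hq
      apply pvPairCongr
      apply pvCrow_congr
      · intro j _ _
        have hz : pvContrib cd gp q.1 (PySem.Str.len q.2) it j = 0 := by
          unfold pvContrib; rw [if_neg]; intro hh2; exact hgid hh2.1
        simp only [pvCorr, List.map_cons, List.sum_cons]
        rw [hz]
        ring1
      · intro _ _ _; rfl
    · rw [if_neg hgid]
      have hgid' : it.2.1 = gp := by omega
      by_cases hcnd : 0 < cdLookup cd it.1 it.2.1 ∧ h.contains it.1 = true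
      · rw [if_pos hcnd]
        obtain ⟨hc, hcont⟩ := hcnd
        -- the key it.1 belongs to L
        have hany : L.any (fun q => q.1 == it.1) = true := by
          rw [← pvItems_any h L _ hh]; exact hcont
        obtain ⟨q0, hq0, hq0k⟩ := List.any_eq_true.mp hany
        have hq0k' : q0.1 = it.1 := by exact beq_iff_eq.mp hq0k
        have hkeys : h.keys.Nodup := by
          unfold PySem.Dict.keys
          rw [hh, List.map_map]
          exact hnd
        have hget : h.get? it.1 = some (pvCrow (PySem.Str.len q0.2) (F q0) (G q0)) := by
          apply PySem.Dict.get?_of_mem_items _ _ hkeys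
          rw [hh]
          have : (q0.1, pvCrow (PySem.Str.len q0.2) (F q0) (G q0))
              ∈ L.map (fun q => (q.1, pvCrow (PySem.Str.len q.2) (F q) (G q))) :=
            List.mem_map_of_mem hq0
          rwa [hq0k'] at this
        have hn0 : 0 ≤ PySem.Str.len q0.2 := by simp [PySem.Str.len]
        rw [hget]
        simp only [Option.getD_some]
        rw [pvCrow_size (PySem.Str.len q0.2) hn0 (F q0) (G q0)]
        have hbound : (0 ≤ it.2.2.2.1 ∨ min it.2.2.2.2.1 (PySem.Str.len q0.2) ≤ it.2.2.2.1) := by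
          by_cases hneg : it.2.2.2.1 < 0
          · right
            have := hpre it (by simp) hgid' hneg
            have hmem : it.1 ∈ L.map Prod.fst := by
              rw [← hq0k']; exact List.mem_map_of_mem hq0
            by_cases hpe : it.2.2.2.1 < it.2.2.2.2.1
            · exact absurd ⟨hc, hmem, hpe⟩ this
            · omega
          · left; omega
        rw [pvRowFold_corr (PySem.Str.len q0.2) (cdLookup cd it.1 it.2.1)
          ((min it.2.2.2.2.1 (PySem.Str.len q0.2) - it.2.2.2.1)).toNat
          it.2.2.2.1 (min it.2.2.2.2.1 (PySem.Str.len q0.2)) rfl (le_min_iff.mp le_rfl).2 hbound (F q0) (G q0)]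
        rw [ih hpre' (fun q => fun i => F q i + pvContrib cd gp q.1 (PySem.Str.len q.2) it i) G _
          (pvInsert_upd h L _ _ hh it.1 _ hcont (by
            intro q hq
            constructor
            · intro hqk
              have hq1 : q.1 = q0.1 := by rw [hqk, ← hq0k']
              have hq2 : q.2 = q0.2 := pvNodupVal L hnd (k := q.1) (t := q.2) (t' := q0.2)
                (by rw [Prod.mk.eta]; exact hq)
                (by rw [hq1, Prod.mk.eta]; exact hq0)
              have hqq0 : q = q0 := Prod.ext hq1 hq2
              rw [hqq0]
              apply pvCrow_congr
              · intro j _ _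
                dsimp only
                have hkq0 : it.1 = q0.1 := hq0k'.symm
                unfold pvContrib
                by_cases hD : it.2.2.2.1 ≤ j ∧ j < min it.2.2.2.2.1 (PySem.Str.len q0.2)
                · rw [if_pos hD, if_pos ⟨hgid', hkq0, hc, hD.1, hD.2⟩]
                · rw [if_neg hD, if_neg (by intro hh2; exact hD ⟨hh2.2.2.2.1, hh2.2.2.2.2⟩)]
                  try ring1
              · intro _ _ _; rfl
            · intro hqk
              apply pvCrow_congr
              · intro j _ _
                dsimp only
                have hz : pvContrib cd gp q.1 (PySem.Str.len q.2) it j = 0 := by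
                  unfold pvContrib; rw [if_neg]; intro hh2; exact hqk hh2.2.1.symm
                rw [hz]
                ring1
              · intro _ _ _; rfl))]
        apply List.map_congr_left
        intro q hq
        apply pvPairCongr
        apply pvCrow_congr
        · intro j _ _
          dsimp only
          simp only [pvCorr, List.map_cons, List.sum_cons]
          ring1
        · intro _ _ _; rfl
      · rw [if_neg hcnd, ih hpre' F G h hh]
        apply List.map_congr_left
        intro q hq
        apply pvPairCongr
        apply pvCrow_congr
        · intro j _ _
          have hz : pvContrib cd gp q.1 (PySem.Str.len q.2) it j = 0 := by
            unfold pvContrib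
            rw [if_neg]
            intro hh2
            apply hcnd
            refine ⟨hh2.2.2.1, ?_⟩
            rw [pvItems_any h L _ hh]
            apply List.any_eq_true.mpr
            exact ⟨q, hq, by rw [hh2.2.1]; simp⟩
          simp only [pvCorr, List.map_cons, List.sum_cons]
          rw [hz]
          ring1
        · intro _ _ _; rfl


theorem pvPhase2 (gp : Int) (L : List (Int × String)) (hnd : (L.map Prod.fst).Nodup)
    (ipd : List (Int × Int × List Int)) :
    ∀ (F G : Int × String → Int → Int)
      (h : PySem.Dict Int (PySem.Dict Int (PySem.Dict String Int))),
    h.items = L.map (fun q => (q.1, pvCrow (PySem.Str.len q.2) (F q) (G q))) →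
    (ipd.foldl (fun h it =>
      if it.2.1 ≠ gp then h
      else if it.2.2 ≠ [] ∧ h.contains it.1 then
        h.insert it.1 (it.2.2.foldl (fun r p =>
          if 0 ≤ p ∧ p < ((r.size : Int)) then
            r.modify p PySem.Dict.empty (fun cell => cell.modify "incorrect" 0 (fun x => x + 1))
          else r) ((h.get? it.1).getD PySem.Dict.empty))
      else h) h).items
      = L.map (fun q => (q.1, pvCrow (PySem.Str.len q.2) (F q)
          (fun i => G q i + pvIncv ipd gp q.1 i))) := by
  induction ipd with
  | nil =>
    intro F G h hh
    rw [List.foldl_nil, hh]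
    apply List.map_congr_left
    intro q hq
    apply pvPairCongr
    apply pvCrow_congr
    · intro _ _ _; rfl
    · intro j _ _
      simp [pvIncv]
  | cons it rest ih =>
    intro F G h hh
    simp only [List.foldl_cons]
    by_cases hgid : it.2.1 ≠ gp
    · rw [if_pos hgid, ih F G h hh]
      apply List.map_congr_left
      intro q hq
      apply pvPairCongr
      apply pvCrow_congr
      · intro _ _ _; rfl
      · intro j _ _
        simp only [pvIncv, List.map_cons, List.sum_cons]
        rw [if_neg (by intro hh2; exact hgid hh2.1)]
        ring1
    · rw [if_neg hgid]
      have hgid' : it.2.1 = gp := by omega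
      by_cases hcnd : it.2.2 ≠ [] ∧ h.contains it.1 = true
      · rw [if_pos hcnd]
        obtain ⟨hne, hcont⟩ := hcnd
        have hany : L.any (fun q => q.1 == it.1) = true := by
          rw [← pvItems_any h L _ hh]; exact hcont
        obtain ⟨q0, hq0, hq0k⟩ := List.any_eq_true.mp hany
        have hq0k' : q0.1 = it.1 := beq_iff_eq.mp hq0k
        have hkeys : h.keys.Nodup := by
          unfold PySem.Dict.keys
          rw [hh, List.map_map]
          exact hnd
        have hget : h.get? it.1 = some (pvCrow (PySem.Str.len q0.2) (F q0) (G q0)) := by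
          apply PySem.Dict.get?_of_mem_items _ _ hkeys
          rw [hh]
          have : (q0.1, pvCrow (PySem.Str.len q0.2) (F q0) (G q0))
              ∈ L.map (fun q => (q.1, pvCrow (PySem.Str.len q.2) (F q) (G q))) :=
            List.mem_map_of_mem hq0
          rwa [hq0k'] at this
        have hn0 : 0 ≤ PySem.Str.len q0.2 := by simp [PySem.Str.len]
        rw [hget]
        simp only [Option.getD_some]
        rw [pvRowFold_inc (PySem.Str.len q0.2) hn0 (F q0) it.2.2 (G q0)]
        rw [ih F (fun q => fun i => G q i +
            (if it.2.1 = gp ∧ it.1 = q.1 then ((it.2.2.count i : Int)) else 0)) _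
          (pvInsert_upd h L _ _ hh it.1 _ hcont (by
            intro q hq
            constructor
            · intro hqk
              have hq1 : q.1 = q0.1 := by rw [hqk, ← hq0k']
              have hq2 : q.2 = q0.2 := pvNodupVal L hnd (k := q.1) (t := q.2) (t' := q0.2)
                (by rw [Prod.mk.eta]; exact hq)
                (by rw [hq1, Prod.mk.eta]; exact hq0)
              have hqq0 : q = q0 := Prod.ext hq1 hq2
              rw [hqq0]
              apply pvCrow_congr
              · intro _ _ _; rfl
              · intro j _ _
                dsimp only
                rw [if_pos ⟨hgid', hq0k'.symm⟩]
            · intro hqk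
              apply pvCrow_congr
              · intro _ _ _; rfl
              · intro j _ _
                dsimp only
                rw [if_neg (by intro hh2; exact hqk hh2.2.symm)]
                ring1))]
        apply List.map_congr_left
        intro q hq
        apply pvPairCongr
        apply pvCrow_congr
        · intro _ _ _; rfl
        · intro j _ _
          dsimp only
          simp only [pvIncv, List.map_cons, List.sum_cons]
          ring1
      · rw [if_neg hcnd, ih F G h hh]
        apply List.map_congr_left
        intro q hq
        apply pvPairCongr
        apply pvCrow_congr
        · intro _ _ _; rfl
        · intro j _ _
          simp only [pvIncv, List.map_cons, List.sum_cons]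
          by_cases hA : it.2.2 = []
          · rw [hA]
            simp
          · have hB : h.contains it.1 ≠ true := by
              intro hb; exact hcnd ⟨hA, hb⟩
            rw [if_neg (by
              intro hh2
              apply hB
              rw [pvItems_any h L _ hh]
              apply List.any_eq_true.mpr
              exact ⟨q, hq, by rw [hh2.2]; simp⟩)]
            ring1

theorem pvA_eq_pvOut (lines : List (Int × String)) (gis : List (Int × Int × String × Int × Int × String)) (cd : List (Int × Int × Int)) (ipd : List (Int × Int × List Int)) (gp : Int)
    (hpre : Pre_build_heatmap_data lines gis cd ipd gp) :
    build_heatmap_data lines gis cd ipd gp = pvOut lines gis cd ipd gp := by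
  unfold build_heatmap_data pvOut pvT
  dsimp only
  have hndT : (((lines.foldl (fun d p => d.insert p.1 p.2) PySem.Dict.empty).items).map Prod.fst).Nodup :=
    PySem.Dict.nodup_keys_foldl_insert_key lines Prod.fst (fun _ x => x.2) PySem.Dict.empty
      PySem.Dict.nodup_keys_empty
  have hmemk : ∀ k : Int, k ∈ ((lines.foldl (fun d p => d.insert p.1 p.2) PySem.Dict.empty).items).map Prod.fst →
      k ∈ lines.map Prod.fst := by
    intro k hk
    have hkeys := PySem.Dict.keys_foldl_insert_key (κ := Int) (ν := String) lines Prod.fst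
      (fun _ x => x.2) PySem.Dict.empty
    have : k ∈ (lines.foldl (fun d p => d.insert p.1 p.2) PySem.Dict.empty).keys := hk
    rw [hkeys] at this
    exact (PySem.Set.mem_ofList _ _).mp this
  have hpreT : ∀ it ∈ gis, it.2.1 = gp → it.2.2.2.1 < 0 →
      ¬(0 < cdLookup cd it.1 it.2.1 ∧
        it.1 ∈ ((lines.foldl (fun d p => d.insert p.1 p.2) PySem.Dict.empty).items).map Prod.fst ∧
        it.2.2.2.1 < it.2.2.2.2.1) := by
    intro it hit h1 h2 hcon
    exact hpre it hit h1 h2 ⟨hcon.1, hmemk it.1 hcon.2.1, hcon.2.2⟩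
  have h0 := pvInit lines PySem.Dict.empty PySem.Dict.empty rfl
  have h0' : (lines.foldl (fun h p => h.insert p.1 (pvInitRow p.2)) PySem.Dict.empty).items
      = ((lines.foldl (fun d p => d.insert p.1 p.2) PySem.Dict.empty).items).map
        (fun q => (q.1, pvCrow (PySem.Str.len q.2)
          ((fun (_ : Int × String) (_ : Int) => (0:Int)) q) ((fun (_ : Int × String) (_ : Int) => (0:Int)) q))) := by
    rw [h0]
    apply List.map_congr_left
    intro q _
    rw [pvInitRow_eq]
  have h1 := pvPhase1 cd gp _ hndT gis hpreT _ _ _ h0'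
  have h2 := pvPhase2 gp _ hndT ipd _ _ _ h1
  rw [h2, List.map_map]
  apply List.map_congr_left
  intro q hq
  dsimp only [Function.comp]
  apply pvPairCongr
  unfold pvCrow pvCell
  simp only [PySem.Dict.items, List.map_map]
  apply List.map_congr_left
  intro i hi
  dsimp only [Function.comp]
  norm_num

theorem pvB_eq_pvOut (lines : List (Int × String)) (gis : List (Int × Int × String × Int × Int × String)) (cd : List (Int × Int × Int)) (ipd : List (Int × Int × List Int)) (gp : Int)
    (hpre : Pre_build_heatmap_data lines gis cd ipd gp) :
    build_heatmap_data_alt lines gis cd ipd gp = pvOut lines gis cd ipd gp := by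
  unfold build_heatmap_data_alt pvOut pvT
  dsimp only
  rw [PySem.List.foldl_append_singleton_eq_map, List.nil_append]
  apply List.map_congr_left
  intro q hq
  have hln : q.1 ∈ lines.map Prod.fst := by
    have hkeys := PySem.Dict.keys_foldl_insert_key (κ := Int) (ν := String) lines Prod.fst
      (fun _ x => x.2) PySem.Dict.empty
    have hmemk : q.1 ∈ (lines.foldl (fun d p => d.insert p.1 p.2) PySem.Dict.empty).keys := by
      unfold PySem.Dict.keys
      exact List.mem_map_of_mem hq
    rw [hkeys] at hmemk
    have : q.1 ∈ PySem.Set.ofList (lines.map Prod.fst) := hmemk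
    exact (PySem.Set.mem_ofList _ _).mp this
  have hn : 0 ≤ PySem.Str.len q.2 := by
    simp [PySem.Str.len]
  set n : Int := PySem.Str.len q.2 with hndef
  have hps : ∀ it ∈ gis, it.2.1 = gp → it.1 = q.1 → 0 < cdLookup cd it.1 it.2.1 →
      it.2.2.2.1 < min it.2.2.2.2.1 n → 0 ≤ it.2.2.2.1 := by
    intro it hit h1 h2 h3 h4
    by_cases hneg : it.2.2.2.1 < 0
    · exact absurd (And.intro h3 (And.intro (h2 ▸ hln) (by omega))) (hpre it hit h1 hneg)
    · omega
  congr 1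
  rw [pvPrefixI _ _ n hn]
  dsimp only
  apply List.map_congr_left
  intro i hi
  obtain ⟨hi0, hin⟩ := PySem.List.mem_pyRange_one.mp hi
  have hdiffval : ∀ j, 0 ≤ j → j ≤ n → PySem.List.pyGetD (gis.foldl (fun dl it =>
      if it.2.1 = gp ∧ it.1 = q.1 then
        if 0 < cdLookup cd it.1 it.2.1 then
          if it.2.2.2.1 < min it.2.2.2.2.1 n then
            PySem.List.pySetD
              (PySem.List.pySetD dl it.2.2.2.1 (PySem.List.pyGetD dl it.2.2.2.1 0 + cdLookup cd it.1 it.2.1))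
              (min it.2.2.2.2.1 n)
              (PySem.List.pyGetD
                (PySem.List.pySetD dl it.2.2.2.1 (PySem.List.pyGetD dl it.2.2.2.1 0 + cdLookup cd it.1 it.2.1))
                (min it.2.2.2.2.1 n) 0 - cdLookup cd it.1 it.2.1)
          else dl
        else dl
      else dl) (List.replicate (n.toNat + 1) (0:Int))) j 0
      = (gis.map (fun it => pvDContrib cd gp q.1 n it j)).sum := by
    intro j hj0 hjn
    rw [pvDiff_val cd gp q.1 n gis hps (List.replicate (n.toNat + 1) (0:Int))
      (List.length_replicate) j hj0 hjn, pvGetD_replicate _ _ hj0, zero_add]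
  have hcorr : ((PySem.List.pyRange 0 (i+1)).map (fun j => PySem.List.pyGetD (gis.foldl (fun dl it =>
      if it.2.1 = gp ∧ it.1 = q.1 then
        if 0 < cdLookup cd it.1 it.2.1 then
          if it.2.2.2.1 < min it.2.2.2.2.1 n then
            PySem.List.pySetD
              (PySem.List.pySetD dl it.2.2.2.1 (PySem.List.pyGetD dl it.2.2.2.1 0 + cdLookup cd it.1 it.2.1))
              (min it.2.2.2.2.1 n)
              (PySem.List.pyGetD
                (PySem.List.pySetD dl it.2.2.2.1 (PySem.List.pyGetD dl it.2.2.2.1 0 + cdLookup cd it.1 it.2.1))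
                (min it.2.2.2.2.1 n) 0 - cdLookup cd it.1 it.2.1)
          else dl
        else dl
      else dl) (List.replicate (n.toNat + 1) (0:Int))) j 0)).sum
      = pvCorr gis cd gp q.1 n i := by
    rw [List.map_congr_left (fun j hj => by
      have := PySem.List.mem_pyRange_one.mp hj
      exact hdiffval j (by omega) (by omega))]
    exact pvSwap cd gp q.1 n gis hps i hi0 hin
  have hincv : PySem.List.pyGetD (ipd.foldl (fun al it =>
      if it.2.1 = gp ∧ it.1 = q.1 then
        it.2.2.foldl (fun al2 p =>
          if 0 ≤ p ∧ p < n then PySem.List.pySetD al2 p (PySem.List.pyGetD al2 p 0 + 1) else al2) al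
      else al) (List.replicate n.toNat (0:Int))) i 0 = pvIncv ipd gp q.1 i := by
    rw [pvInc_val gp q.1 n ipd (List.replicate n.toNat (0:Int)) (List.length_replicate) i hi0 hin,
      pvGetD_replicate _ _ hi0, zero_add]
  rw [hcorr, hincv]

-- ===== VERDICT (by name: the statement is the Claim_ definition above) =====
theorem build_heatmap_data_spec : Claim_equal_build_heatmap_data := by
  intro lines gis cd ipd gp _ hpre
  unfold Spec_build_heatmap_data
  rw [pvA_eq_pvOut lines gis cd ipd gp hpre, pvB_eq_pvOut lines gis cd ipd gp hpre]
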